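-- pv_equiv track=rewrite | github.com/minjo1234/Progrmmers_Problems | LV1/Food_Fighter.py | solution
-- ===== SOURCE A (Python) =====
-- def solution(food):
--     msg = '0'
--     for i in range(len(food)-1, 0, -1):
--         if food[i] < 2:
--             continue
--         if food[i] % 2 == 0:
--             x = food[i] // 2
--             for j in range(0,x):
--                 msg = str(i) + msg + str(i)
--         else:
--             x = (food[i] // 2)
--             for j in range(0,x):
--                 msg = str(i) + msg + str(i)
--     return msg
-- ===== SOURCE B (Python) =====
-- def solution(food):
--     tokens = [str(i) * (food[i] // 2) for i in range(1, len(food))]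
--     return ''.join(tokens) + '0' + ''.join(reversed(tokens))
-- ===== Notes on version B (the rewrite author's own statement) =====
-- stated objective: simpler
-- what changed: Replaces the center-out prepend/append string growth (quadratic re-copying of msg, with two identical parity branches) by building the list of half-tokens in one increasing pass and mirroring it around '0'.
import Mathlib
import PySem

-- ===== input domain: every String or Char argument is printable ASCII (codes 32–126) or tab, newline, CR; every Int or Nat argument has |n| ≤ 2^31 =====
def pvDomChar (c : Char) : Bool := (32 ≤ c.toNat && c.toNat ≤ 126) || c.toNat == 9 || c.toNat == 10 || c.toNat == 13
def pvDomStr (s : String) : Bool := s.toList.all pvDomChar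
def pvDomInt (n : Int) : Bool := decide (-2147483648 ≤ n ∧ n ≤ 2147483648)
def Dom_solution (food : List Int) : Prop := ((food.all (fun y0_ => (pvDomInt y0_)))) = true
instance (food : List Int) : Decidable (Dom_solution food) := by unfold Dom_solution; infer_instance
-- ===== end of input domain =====

-- B builds the list of left-half tokens in one increasing pass and mirrors it around '0',
-- instead of A's center-out prepend/append growth (simpler; A's two parity branches are identical).

-- ===== PORT A =====
-- food[i] with 1 ≤ i < len(food) is always in range, so pyGetD with default 0 is exact here.
def solution (food : List Int) : String :=
  String.ofList <|
    (PySem.List.pyRange ((food.length : Int) - 1) 0 (-1)).foldl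
      (fun msg i =>
        let fi := PySem.List.pyGetD food i 0
        if fi < 2 then msg
        else if PySem.Int.mod fi 2 = 0 then
          let x := PySem.Int.floordiv fi 2
          (PySem.List.pyRange 0 x 1).foldl
            (fun m _ => PySem.Int.toChars i ++ m ++ PySem.Int.toChars i) msg
        else
          let x := PySem.Int.floordiv fi 2
          (PySem.List.pyRange 0 x 1).foldl
            (fun m _ => PySem.Int.toChars i ++ m ++ PySem.Int.toChars i) msg)
      ['0']

-- ===== PORT B =====
def solution_alt (food : List Int) : String :=
  let tokens := (PySem.List.pyRange 1 (food.length : Int) 1).map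
    (fun i => PySem.List.pyRepeat (PySem.Int.toChars i)
                (PySem.Int.floordiv (PySem.List.pyGetD food i 0) 2))
  String.ofList (tokens.flatten ++ ['0'] ++ tokens.reverse.flatten)

-- ===== PRECONDITION & SPEC =====
def Spec_solution (food : List Int) (out : String) : Prop := out = solution_alt food
instance (food : List Int) (out : String) : Decidable (Spec_solution food out) := by unfold Spec_solution; infer_instance

-- ===== CLAIM (what is proved, stated in full; the proofs are below) =====
def Claim_equal_solution : Prop := ∀ (food : List Int), Dom_solution food → Spec_solution food (solution food)

-- ===== LEMMAS AND PROOFS =====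

-- constant-body fold over range n wraps msg in n copies of t on each side
theorem range_wrap (t : List Char) (n : Nat) (msg : List Char) :
    (List.range n).foldl (fun m _ => t ++ m ++ t) msg
      = (List.replicate n t).flatten ++ msg ++ (List.replicate n t).flatten := by
  induction n generalizing msg with
  | zero => simp
  | succ n ih =>
      rw [List.range_succ, List.foldl_append, ih]
      have hc : ∀ k : Nat, (List.replicate k t).flatten ++ t = t ++ (List.replicate k t).flatten := by
        intro k
        induction k with
        | zero => simp
        | succ k ihk => simp [List.replicate_succ, List.append_assoc, ihk]
      simp only [List.foldl_cons, List.foldl_nil, List.replicate_succ, List.flatten_cons,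
        List.append_assoc]
      simp only [← List.append_assoc]
      rw [List.append_assoc (t ++ (List.replicate n t).flatten ++ msg), hc,
        ← List.append_assoc]

-- the inner Python loop wraps msg in x copies of t on each side
theorem inner_wrap (t msg : List Char) (x : Int) :
    (PySem.List.pyRange 0 x 1).foldl (fun m _ => t ++ m ++ t) msg
      = PySem.List.pyRepeat t x ++ msg ++ PySem.List.pyRepeat t x := by
  rw [PySem.List.pyRange_one, List.foldl_map, PySem.List.pyRepeat]
  simpa using range_wrap t (x - 0).toNat msg

-- the whole descending fold, for ANY index list, splits into mirrored halves
theorem outer_wrap (rep : Int → List Char) (l : List Int) (msg : List Char) :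
    l.foldl (fun m i => rep i ++ m ++ rep i) msg
      = (l.reverse.map rep).flatten ++ msg ++ (l.map rep).flatten := by
  induction l generalizing msg with
  | nil => simp
  | cons a l ih =>
      rw [List.foldl_cons, ih]
      simp [List.append_assoc]

-- ===== VERDICT (by name: the statement is the Claim_ definition above) =====
theorem solution_spec : Claim_equal_solution := by
  intro food _
  unfold Spec_solution solution solution_alt
  set rep : Int → List Char := fun i =>
    PySem.List.pyRepeat (PySem.Int.toChars i)
      (PySem.Int.floordiv (PySem.List.pyGetD food i 0) 2) with hrep
  have hbody : (fun (msg : List Char) (i : Int) =>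
      let fi := PySem.List.pyGetD food i 0
      if fi < 2 then msg
      else if PySem.Int.mod fi 2 = 0 then
        let x := PySem.Int.floordiv fi 2
        (PySem.List.pyRange 0 x 1).foldl
          (fun m _ => PySem.Int.toChars i ++ m ++ PySem.Int.toChars i) msg
      else
        let x := PySem.Int.floordiv fi 2
        (PySem.List.pyRange 0 x 1).foldl
          (fun m _ => PySem.Int.toChars i ++ m ++ PySem.Int.toChars i) msg)
      = fun m i => rep i ++ m ++ rep i := by
    funext m i
    simp only [hrep]
    split_ifs with h1 h2
    · -- food[i] < 2 ⇒ food[i] // 2 ≤ 0 ⇒ the repetition is empty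
      rw [PySem.Int.floordiv_eq_ediv_of_pos (by omega : (0:Int) < 2)]
      have h0 : (PySem.List.pyGetD food i 0 / 2).toNat = 0 := by omega
      simp [PySem.List.pyRepeat, h0]
    · exact inner_wrap _ m _
    · exact inner_wrap _ m _
  rw [hbody, PySem.List.pyRange_neg_one_eq_reverse]
  have hn : (food.length : Int) - 1 + 1 = (food.length : Int) := by ring
  rw [hn, outer_wrap]
  simp [List.map_reverse]
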